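-- pv_equiv track=rewrite | github.com/HoMuChen/fire-auto | backtest.py | strategy_turn_of_month
-- ===== SOURCE A (Python) =====
-- def strategy_turn_of_month(prices):
--     """月初效應：每月最後 1 個交易日買入，第 3 個交易日賣出"""
--     signals = [None] * len(prices)
--     for i in range(1, len(prices)):
--         cur_month = prices[i]["date"][:7]
--         prev_month = prices[i - 1]["date"][:7]
--         # 月末最後一天 = 下一天是新月份
--         if i < len(prices) - 1:
--             next_month = prices[i + 1]["date"][:7]
--             if cur_month != next_month:
--                 signals[i] = "buy"
--     return signals
-- ===== SOURCE B (Python) =====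
-- from itertools import groupby
--
--
-- def strategy_turn_of_month(prices):
--     """月初效應：每月最後 1 個交易日買入，第 3 個交易日賣出"""
--     n = len(prices)
--     signals = [None] * n
--     if n < 2:
--         return signals
--     months = [p["date"][:7] for p in prices]
--     i = 0
--     for _, run in groupby(months):
--         i += sum(1 for _ in run)
--         end = i - 1
--         if 0 < end < n - 1:
--             signals[end] = "buy"
--     return signals
-- ===== Notes on version B (the rewrite author's own statement) =====
-- stated objective: alternative
-- what changed: Replaces the adjacent-index scan that compares prices[i] with prices[i+1] by a groupby pass: month keys are computed once, itertools.groupby partitions them into consecutive same-month runs, and each run's last index is marked 'buy' when strictly inside the series.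
import Mathlib
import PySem

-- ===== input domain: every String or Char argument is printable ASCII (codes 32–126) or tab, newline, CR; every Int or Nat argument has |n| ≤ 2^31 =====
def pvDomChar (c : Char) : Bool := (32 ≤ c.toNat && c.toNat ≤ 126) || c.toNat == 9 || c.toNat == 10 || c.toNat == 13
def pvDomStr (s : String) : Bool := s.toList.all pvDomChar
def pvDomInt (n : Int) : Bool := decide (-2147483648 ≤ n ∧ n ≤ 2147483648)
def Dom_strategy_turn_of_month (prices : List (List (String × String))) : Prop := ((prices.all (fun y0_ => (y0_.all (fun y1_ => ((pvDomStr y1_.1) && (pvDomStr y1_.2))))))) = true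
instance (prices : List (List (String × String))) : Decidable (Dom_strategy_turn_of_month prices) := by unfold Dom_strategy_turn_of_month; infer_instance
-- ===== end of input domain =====

-- B replaces A's adjacent-index scan by a groupby decomposition (consecutive same-month runs,
-- marking each run's last index when strictly inside the series); same return value as A.

-- shared helper: p["date"][:7] (both Pythons compute exactly this month key)
def pvMonth (p : List (String × String)) : String :=
  PySem.Str.slice (PySem.Dict.getD (PySem.Dict.mk p) "date" "") none (some 7)

-- ===== PORT A =====
def strategy_turn_of_month (prices : List (List (String × String))) : List (Option String) :=
  let signals : List (Option String) := List.replicate prices.length none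
  (PySem.List.pyRange 1 (prices.length : Int)).foldl
    (fun signals i =>
      let cur := pvMonth (PySem.List.pyGetD prices i [])
      let _prev := pvMonth (PySem.List.pyGetD prices (i - 1) [])
      if i < (prices.length : Int) - 1 then
        let nxt := pvMonth (PySem.List.pyGetD prices (i + 1) [])
        if cur ≠ nxt then signals.set i.toNat (some "buy") else signals
      else signals)
    signals

-- ===== PORT B =====
-- itertools.groupby over the month list, reduced to the list of consecutive-run lengths
def pvRunsGo (cur : String) (cnt : Nat) : List String → List Nat
  | [] => [cnt]
  | y :: ys => if y = cur then pvRunsGo cur (cnt + 1) ys else cnt :: pvRunsGo y 1 ys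

def pvRuns : List String → List Nat
  | [] => []
  | x :: xs => pvRunsGo x 1 xs

def strategy_turn_of_month_alt (prices : List (List (String × String))) : List (Option String) :=
  let n := prices.length
  let signals : List (Option String) := List.replicate n none
  if n < 2 then signals else
    let months := prices.map pvMonth
    ((pvRuns months).foldl
      (fun (st : List (Option String) × Nat) len =>
        let i := st.2 + len
        let e := i - 1
        (if 0 < e ∧ e < n - 1 then st.1.set e (some "buy") else st.1, i))
      (signals, 0)).1

-- ===== PRECONDITION & SPEC =====
-- Pre_ excludes exactly the inputs where the Python A raises KeyError: a list of length ≥ 2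
-- containing an element without a "date" key (for length ≤ 1 A never subscripts and returns).
def Pre_strategy_turn_of_month (prices : List (List (String × String))) : Prop :=
  2 ≤ prices.length → ∀ p ∈ prices, "date" ∈ p.map Prod.fst
instance (prices : List (List (String × String))) : Decidable (Pre_strategy_turn_of_month prices) := by unfold Pre_strategy_turn_of_month; infer_instance

def pvWitness_strategy_turn_of_month : (List (List (String × String))) :=
  [[("date", "2024-01-30")], [("date", "2024-02-01")], [("date", "2024-02-02")]]

def Spec_strategy_turn_of_month (prices : List (List (String × String))) (out : List (Option String)) : Prop := out = strategy_turn_of_month_alt prices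
instance (prices : List (List (String × String))) (out : List (Option String)) : Decidable (Spec_strategy_turn_of_month prices out) := by unfold Spec_strategy_turn_of_month; infer_instance

-- ===== CLAIM (what is proved, stated in full; the proofs are below) =====
def Claim_equal_strategy_turn_of_month : Prop := ∀ (prices : List (List (String × String))), Dom_strategy_turn_of_month prices → Pre_strategy_turn_of_month prices → Spec_strategy_turn_of_month prices (strategy_turn_of_month prices)

-- ===== LEMMAS AND PROOFS =====

-- the indices B marks: run ends of (cur :: ms), offset by base b
def pvMarksAux (cur : String) (b : Nat) : List String → List Nat
  | [] => [b]
  | y :: ys => if y = cur then pvMarksAux y (b + 1) ys else b :: pvMarksAux y (b + 1) ys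

theorem pvMarksAux_lb : ∀ (ms : List String) (cur : String) (b j : Nat),
    j ∈ pvMarksAux cur b ms → b ≤ j := by
  intro ms
  induction ms with
  | nil => intro cur b j h; simp [pvMarksAux] at h; omega
  | cons y ys ih =>
    intro cur b j h
    simp only [pvMarksAux] at h
    split at h
    · exact Nat.le_of_succ_le (ih y (b+1) j h)
    · rcases List.mem_cons.mp h with h | h
      · omega
      · exact Nat.le_of_succ_le (ih y (b+1) j h)

-- membership in pvMarksAux = the adjacent months differ (or there is no next month)
theorem mem_pvMarksAux : ∀ (ms : List String) (cur : String) (b j : Nat),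
    j ∈ pvMarksAux cur b ms ↔
      b ≤ j ∧ (cur :: ms)[j - b]? ≠ (cur :: ms)[j - b + 1]? := by
  intro ms
  induction ms with
  | nil =>
    intro cur b j
    simp only [pvMarksAux, List.mem_singleton]
    constructor
    · rintro rfl; simp
    · rintro ⟨hb, hne⟩
      by_contra hne2
      have ht : 1 ≤ j - b := by omega
      exact hne (by rw [List.getElem?_eq_none (by simpa using ht),
                        List.getElem?_eq_none (by simp)])
  | cons y ys ih =>
    intro cur b j
    simp only [pvMarksAux]
    by_cases hj : j = b
    · subst hj
      constructor
      · intro h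
        split at h
        · exfalso; have := pvMarksAux_lb ys y (j+1) j h; omega
        · simp
          next hne => intro hcy; exact hne hcy.symm
      · rintro ⟨-, hne⟩
        simp at hne
        split
        · exact absurd ‹y = cur›.symm hne
        · simp
    · by_cases hbj : b ≤ j
      · have h1 : j - b = (j - (b+1)) + 1 := by omega
        rw [h1]
        simp only [List.getElem?_cons_succ]
        have hsplit : (j ∈ (if y = cur then pvMarksAux y (b+1) ys
              else b :: pvMarksAux y (b+1) ys)) ↔ j ∈ pvMarksAux y (b+1) ys := by
          split
          · exact Iff.rfl
          · simp [List.mem_cons, hj]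
        rw [hsplit, ih y (b+1) j]
        constructor
        · rintro ⟨-, h⟩; exact ⟨hbj, h⟩
        · rintro ⟨-, h⟩; exact ⟨by omega, h⟩
      · constructor
        · intro h
          exfalso
          have hm : b ≤ j := pvMarksAux_lb (y::ys) cur b j (by simpa [pvMarksAux] using h)
          omega
        · rintro ⟨hb, -⟩; omega

-- B's pair fold over the run lengths = a plain mark fold over the run-end indices
theorem pvRunsGo_foldl (P : Nat → Prop) [DecidablePred P] :
    ∀ (ms : List String) (cur : String) (cnt : Nat) (sig : List (Option String)) (i : Nat),
      1 ≤ cnt →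
      (pvRunsGo cur cnt ms).foldl
          (fun (st : List (Option String) × Nat) len =>
            (if P (st.2 + len - 1) then st.1.set (st.2 + len - 1) (some "buy") else st.1,
             st.2 + len))
          (sig, i)
        = ((pvMarksAux cur (i + cnt - 1) ms).foldl
             (fun s e => if P e then s.set e (some "buy") else s) sig,
           i + cnt + ms.length) := by
  intro ms
  induction ms with
  | nil => intro cur cnt sig i hc; simp [pvRunsGo, pvMarksAux]
  | cons y ys ih =>
    intro cur cnt sig i hc
    simp only [pvRunsGo, pvMarksAux]
    by_cases hy : y = cur
    · subst hy
      rw [if_pos rfl, if_pos rfl, ih y (cnt+1) sig i (by omega),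
          show i + (cnt+1) - 1 = i + cnt - 1 + 1 by omega]
      simp only [Prod.ext_iff, List.length_cons]
      exact ⟨trivial, by omega⟩
    · rw [if_neg hy, if_neg hy]
      simp only [List.foldl_cons]
      rw [ih y 1 _ (i + cnt) (by omega)]
      rw [show i + cnt + 1 - 1 = i + cnt - 1 + 1 by omega]
      simp only [Prod.ext_iff, List.length_cons]
      exact ⟨trivial, by omega⟩

-- a mark fold touches index j iff j is listed and satisfies the guard
theorem foldl_mark_getElem (P : Nat → Prop) [DecidablePred P] :
    ∀ (L : List Nat) (sig : List (Option String)) (j : Nat),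
      (L.foldl (fun s e => if P e then s.set e (some "buy") else s) sig)[j]?
        = if j ∈ L ∧ P j ∧ j < sig.length then some (some "buy") else sig[j]? := by
  intro L
  induction L with
  | nil => intro sig j; simp
  | cons a L ih =>
    intro sig j
    simp only [List.foldl_cons]
    rw [ih]
    by_cases haj : a = j
    · subst haj
      by_cases hp : P a
      · by_cases hlen : a < sig.length
        · simp [hp, hlen, List.length_set]
        · have : sig.set a (some "buy") = sig := List.set_eq_of_length_le (by omega)
          simp [hp, this, hlen]
      · simp [hp]
    · have hget : ∀ (s : List (Option String)), ((if P a then s.set a (some "buy") else s))[j]? = s[j]? := by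
        intro s
        split
        · exact List.getElem?_set_ne haj
        · rfl
      have hlen : ∀ (s : List (Option String)), ((if P a then s.set a (some "buy") else s)).length = s.length := by
        intro s; split <;> simp
      rw [hget, hlen]
      by_cases hm : j ∈ L ∧ P j ∧ j < sig.length
      · simp [hm]
      · simp only [List.mem_cons]
        rw [if_neg hm, if_neg (by rintro ⟨h1 | h1, h2, h3⟩; exact haj h1.symm; exact hm ⟨h1, h2, h3⟩)]

-- the Int version, for A's pyRange fold
theorem foldl_mark_getElem_int (C : Int → Prop) [DecidablePred C] :
    ∀ (L : List Int) (sig : List (Option String)) (j : Nat),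
      (∀ x ∈ L, 0 ≤ x) →
      (L.foldl (fun s i => if C i then s.set i.toNat (some "buy") else s) sig)[j]?
        = if (j : Int) ∈ L ∧ C (j : Int) ∧ j < sig.length then some (some "buy") else sig[j]? := by
  intro L
  induction L with
  | nil => intro sig j _; simp
  | cons a L ih =>
    intro sig j hpos
    simp only [List.foldl_cons]
    rw [ih _ _ (fun x hx => hpos x (List.mem_cons_of_mem _ hx))]
    have ha : 0 ≤ a := hpos a (List.mem_cons_self ..)
    by_cases haj : a = (j : Int)
    · have haj' : a.toNat = j := by omega
      by_cases hp : C a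
      · have hpj : C (j : Int) := haj ▸ hp
        by_cases hlen : j < sig.length
        · simp [hp, hpj, hlen, haj', List.length_set]
          exact fun h _ => absurd haj.symm h
        · have hset : sig.set a.toNat (some "buy") = sig := List.set_eq_of_length_le (by omega)
          simp [hp, hset, hlen]
      · have hpj : ¬ C (j : Int) := fun h => hp (haj ▸ h)
        simp [hp, hpj]
    · have hget : ∀ (s : List (Option String)), ((if C a then s.set a.toNat (some "buy") else s))[j]? = s[j]? := by
        intro s
        split
        · exact List.getElem?_set_ne (by omega)
        · rfl
      have hlen : ∀ (s : List (Option String)), ((if C a then s.set a.toNat (some "buy") else s)).length = s.length := by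
        intro s; split <;> simp
      rw [hget, hlen]
      by_cases hm : (j : Int) ∈ L ∧ C (j : Int) ∧ j < sig.length
      · simp [hm]
      · simp only [List.mem_cons]
        rw [if_neg hm, if_neg (by rintro ⟨h1 | h1, h2, h3⟩; exact haj h1.symm; exact hm ⟨h1, h2, h3⟩)]

-- the two ports agree on every input (the precondition is only about A's Python raising)
theorem pv_main_eq (prices : List (List (String × String))) :
    strategy_turn_of_month prices = strategy_turn_of_month_alt prices := by
  set n := prices.length with hn
  by_cases hn2 : n < 2
  · unfold strategy_turn_of_month strategy_turn_of_month_alt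
    rw [if_pos hn2, PySem.List.pyRange_one_eq_nil (by omega)]
    rfl
  · -- rewrite A into the generic mark-fold form
    have hA : strategy_turn_of_month prices
        = (PySem.List.pyRange 1 (n : Int)).foldl
            (fun s i => if (i < (n : Int) - 1 ∧
                pvMonth (PySem.List.pyGetD prices i []) ≠ pvMonth (PySem.List.pyGetD prices (i+1) []))
              then s.set i.toNat (some "buy") else s)
            (List.replicate n none) := by
      unfold strategy_turn_of_month
      rw [← hn]
      refine congrArg (fun f => List.foldl f (List.replicate n (none : Option String))
        (PySem.List.pyRange 1 (n : Int))) ?_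
      funext s i
      by_cases h1 : i < (n : Int) - 1
      · by_cases h2 : pvMonth (PySem.List.pyGetD prices i []) ≠ pvMonth (PySem.List.pyGetD prices (i+1) [])
        · simp [h1, h2]
        · simp [h1, h2]
      · simp [h1]
    obtain ⟨x, rest, hm⟩ : ∃ x rest, prices.map pvMonth = x :: rest := by
      cases hp : prices with
      | nil => exfalso; rw [hp] at hn; simp at hn; omega
      | cons p ps => exact ⟨pvMonth p, ps.map pvMonth, by simp⟩
    have hB : strategy_turn_of_month_alt prices
        = (pvMarksAux x 0 rest).foldl
            (fun s e => if (0 < e ∧ e < n - 1) then s.set e (some "buy") else s)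
            (List.replicate n none) := by
      unfold strategy_turn_of_month_alt
      rw [← hn, if_neg hn2, hm]
      show ((pvRunsGo x 1 rest).foldl
          (fun (st : List (Option String) × Nat) len =>
            (if (0 < st.2 + len - 1 ∧ st.2 + len - 1 < n - 1) then st.1.set (st.2 + len - 1) (some "buy") else st.1,
             st.2 + len)) (List.replicate n none, 0)).1 = _
      rw [pvRunsGo_foldl (fun e => 0 < e ∧ e < n - 1) rest x 1 (List.replicate n none) 0 (by omega)]
    rw [hA, hB]
    apply List.ext_getElem?
    intro j
    rw [foldl_mark_getElem_int _ _ _ _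
        (fun z hz => by have := PySem.List.mem_pyRange_one.mp hz; omega),
      foldl_mark_getElem]
    have hlen : (List.replicate n (none : Option String)).length = n := by simp
    rw [hlen]
    by_cases hj : 1 ≤ j ∧ j + 1 < n
    · -- both conditions reduce to the month comparison at j, j+1
      have hjn : (j : Int) ∈ PySem.List.pyRange 1 (n : Int) := by
        rw [PySem.List.mem_pyRange_one]; omega
      have hlt : ((j : Int) < (n : Int) - 1) := by omega
      have hg1 : PySem.List.pyGetD prices (j : Int) [] = prices.getD j [] :=
        PySem.List.pyGetD_natCast ..
      have hg2 : PySem.List.pyGetD prices ((j : Int) + 1) [] = prices.getD (j+1) [] := by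
        rw [show ((j : Int) + 1) = ((j + 1 : Nat) : Int) by push_cast; ring]
        exact PySem.List.pyGetD_natCast ..
      have hj1 : j < prices.length := by omega
      have hj2 : j + 1 < prices.length := by omega
      have hmj : (x :: rest)[j]? = some (pvMonth prices[j]) := by
        rw [← hm]; simp [List.getElem?_map, List.getElem?_eq_getElem hj1]
      have hmj1 : (x :: rest)[j + 1]? = some (pvMonth prices[j+1]) := by
        rw [← hm]; simp [List.getElem?_map, List.getElem?_eq_getElem hj2]
      have hmem : j ∈ pvMarksAux x 0 rest ↔
          pvMonth prices[j] ≠ pvMonth prices[j+1] := by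
        rw [mem_pvMarksAux rest x 0 j]
        simp only [Nat.sub_zero, hmj, hmj1]
        constructor
        · rintro ⟨-, h⟩ hc; exact h (by rw [hc])
        · intro h; exact ⟨Nat.zero_le _, by simpa using h⟩
      have hgd1 : prices.getD j [] = prices[j] := List.getD_eq_getElem _ _ hj1
      have hgd2 : prices.getD (j+1) [] = prices[j+1] := List.getD_eq_getElem _ _ hj2
      by_cases hne : pvMonth prices[j] ≠ pvMonth prices[j+1]
      · rw [if_pos ⟨hjn, ⟨hlt, by rw [hg1, hg2, hgd1, hgd2]; exact hne⟩, by omega⟩,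
            if_pos ⟨hmem.mpr hne, ⟨by omega, by omega⟩, by omega⟩]
      · rw [if_neg (by rintro ⟨-, ⟨-, hc⟩, -⟩; rw [hg1, hg2, hgd1, hgd2] at hc; exact hne hc),
            if_neg (by rintro ⟨hmm, -, -⟩; exact hne (hmem.mp hmm))]
    · -- outside [1, n-2] neither side marks
      rw [if_neg, if_neg]
      · rintro ⟨hmm, ⟨hp1, hp2⟩, hl⟩
        omega
      · rintro ⟨hjn, ⟨hlt, -⟩, hl⟩
        rw [PySem.List.mem_pyRange_one] at hjn
        omega

-- ===== VERDICT (by name: the statement is the Claim_ definition above) =====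
theorem strategy_turn_of_month_spec : Claim_equal_strategy_turn_of_month := by
  intro prices _ _
  exact pv_main_eq prices
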